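-- pv_equiv track=rewrite | github.com/clemvg/AdventOfCode | tasks/day_3_the_lobby.py | part_2_generalized_max_bank_joltage
-- ===== SOURCE A (Python) =====
-- def part_2_generalized_max_bank_joltage(bank: int, k: int) -> int:
--     # OTHER APPROACH: stack and push number to stack, pop when needed to form n-digit number
--     """
--     Greedy idea paritally got via AI: remove up to n-k smaller leading digits to favor larger digits earlier.
--     """
--     digits = list(str(bank))
--     n = len(digits)
--     if k <= 0 or k > n:
--         raise ValueError("k must be between 1 and the number of digits in the bank")
--
--     # nmber digits to remove to get k digits
--     removals = n - k
--     result_stack: list[str] = []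
--
--     for digit in digits:
--         # while we can remove digits and the current digit is greater than the last in stack,
--         # pop from stack to favor larger digits earlier
--         while removals > 0 and result_stack and digit > result_stack[-1]:
--             result_stack.pop()
--             # you can safely pop because the first encountered digit cannot be placed after the current digit (order preserved)
--             removals = removals - 1
--         result_stack.append(digit)
--
--     # if no pops happen eg 987654321, trim from the end to get exactly k digits
--     best_k_digits = result_stack[:k]
--     return int("".join(best_k_digits)) # convert back strings to integer
-- ===== SOURCE B (Python) =====
-- def _pick(digits: str, k: int) -> str:
--     # leftmost maximum of the feasible window, then recurse on the suffix
--     if k == 0: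
--         return ""
--     window = digits[: len(digits) - k + 1]
--     m = max(window)
--     j = window.index(m)
--     return m + _pick(digits[j + 1:], k - 1)
--
--
-- def part_2_generalized_max_bank_joltage(bank: int, k: int) -> int:
--     digits = str(bank)
--     if k <= 0 or k > len(digits):
--         raise ValueError("k must be between 1 and the number of digits in the bank")
--     return int(_pick(digits, k))
-- ===== Notes on version B (the rewrite author's own statement) =====
-- stated objective: alternative
-- what changed: Replaces the greedy pop-stack with a positional-window selection: each of the k output digits is the leftmost maximum of the feasible window, recursing on the suffix after it; same ValueError guard.
import Mathlib
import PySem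

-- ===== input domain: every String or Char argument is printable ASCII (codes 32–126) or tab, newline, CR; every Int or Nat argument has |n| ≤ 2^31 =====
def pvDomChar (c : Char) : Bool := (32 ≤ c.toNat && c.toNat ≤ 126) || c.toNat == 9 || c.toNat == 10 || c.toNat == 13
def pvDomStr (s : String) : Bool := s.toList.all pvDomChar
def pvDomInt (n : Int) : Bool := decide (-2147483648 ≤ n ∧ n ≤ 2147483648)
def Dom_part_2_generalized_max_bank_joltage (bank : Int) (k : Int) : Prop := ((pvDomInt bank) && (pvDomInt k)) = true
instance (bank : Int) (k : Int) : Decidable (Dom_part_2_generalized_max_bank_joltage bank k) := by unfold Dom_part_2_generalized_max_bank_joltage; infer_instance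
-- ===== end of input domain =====

-- B replaces A's greedy pop-stack with a positional-window leftmost-maximum selection (alternative algorithm, same guard and result).

-- ===== PORT A =====
-- the inner `while removals > 0 and result_stack and digit > result_stack[-1]: pop`:
-- the stack is held top-at-head (Python appends/pops at the END); it is reversed once at the end, same values
def pvPopA (d : Char) : Nat → List Char → Nat × List Char
  | r, [] => (r, [])
  | r, t :: ts => if 0 < r ∧ t < d then pvPopA d (r - 1) ts else (r, t :: ts)

-- the `for digit in digits` loop: pop phase then push, threading (removals, stack)
def pvRunA : List Char → Nat → List Char → Nat × List Char
  | [], r, st => (r, st)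
  | d :: ds, r, st => pvRunA ds (pvPopA d r st).1 (d :: (pvPopA d r st).2)

def part_2_generalized_max_bank_joltage (bank : Int) (k : Int) : Int :=
  let digits := PySem.Int.toChars bank          -- list(str(bank))
  let n := digits.length
  if k ≤ 0 ∨ (n : Int) < k then 0               -- Python: raise ValueError (excluded by Pre_)
  else
    let stack := ((pvRunA digits (n - k.toNat) []).2).reverse
    (PySem.Int.ofChars? (stack.take k.toNat)).getD 0   -- int("".join(result_stack[:k]))

-- ===== PORT B =====
-- _pick: k = 0 → ""; else leftmost max of digits[: len-k+1], recurse on the suffix after it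
def pvPickB : List Char → Nat → List Char
  | _, 0 => []
  | digits, k + 1 =>
    let window := digits.take (digits.length - (k + 1) + 1)
    match PySem.List.max? window (fun y => y) with
    | none => []                                -- unreachable under Pre_ (max of a nonempty window)
    | some m => m :: pvPickB (digits.drop ((PySem.List.index? window m).getD 0 + 1)) k

def part_2_generalized_max_bank_joltage_alt (bank : Int) (k : Int) : Int :=
  let digits := PySem.Int.toChars bank          -- str(bank)
  if k ≤ 0 ∨ (digits.length : Int) < k then 0   -- Python: raise ValueError (excluded by Pre_)
  else (PySem.Int.ofChars? (pvPickB digits k.toNat)).getD 0   -- int(_pick(digits, k))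

-- ===== PRECONDITION & SPEC =====
-- exactly the ValueError guard of both Pythons: 1 <= k <= len(str(bank))
def Pre_part_2_generalized_max_bank_joltage (bank : Int) (k : Int) : Prop :=
  1 ≤ k ∧ k ≤ ((PySem.Int.toChars bank).length : Int)
instance (bank : Int) (k : Int) : Decidable (Pre_part_2_generalized_max_bank_joltage bank k) := by
  unfold Pre_part_2_generalized_max_bank_joltage; infer_instance

def pvWitness_part_2_generalized_max_bank_joltage : Int × Int := (15243, 3)

def Spec_part_2_generalized_max_bank_joltage (bank : Int) (k : Int) (out : Int) : Prop := out = part_2_generalized_max_bank_joltage_alt bank k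
instance (bank : Int) (k : Int) (out : Int) : Decidable (Spec_part_2_generalized_max_bank_joltage bank k out) := by unfold Spec_part_2_generalized_max_bank_joltage; infer_instance

-- ===== CLAIM (what is proved, stated in full; the proofs are below) =====
def Claim_equal_part_2_generalized_max_bank_joltage : Prop := ∀ (bank : Int) (k : Int), Dom_part_2_generalized_max_bank_joltage bank k → Pre_part_2_generalized_max_bank_joltage bank k → Spec_part_2_generalized_max_bank_joltage bank k (part_2_generalized_max_bank_joltage bank k)

-- ===== LEMMAS AND PROOFS =====

-- pop-phase accounting: budget spent = stack height lost, and the budget never grows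
theorem pvPopA_len (d : Char) (b : Nat) (s : List Char) :
    (pvPopA d b s).1 + s.length = b + (pvPopA d b s).2.length ∧ (pvPopA d b s).1 ≤ b := by
  induction s generalizing b with
  | nil => simp [pvPopA]
  | cons t ts ih =>
    by_cases h : 0 < b ∧ t < d
    · have := ih (b - 1)
      simp only [pvPopA, if_pos h, List.length_cons] at *
      omega
    · simp [pvPopA, if_neg h]

theorem pvPopA_mem (d : Char) (b : Nat) (s : List Char) {x : Char}
    (hx : x ∈ (pvPopA d b s).2) : x ∈ s := by
  induction s generalizing b with
  | nil => simp [pvPopA] at hx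
  | cons t ts ih =>
    by_cases h : 0 < b ∧ t < d
    · simp only [pvPopA, if_pos h] at hx
      exact List.mem_cons_of_mem _ (ih (b - 1) hx)
    · simpa [pvPopA, if_neg h] using hx

-- frame: a bottom element m that the budget can never reach (d ≤ m whenever the pops could expose it) is inert
theorem pvPopA_frame (d m : Char) (b : Nat) (s : List Char) (h : s.length < b → d ≤ m) :
    pvPopA d b (s ++ [m]) = ((pvPopA d b s).1, (pvPopA d b s).2 ++ [m]) := by
  induction s generalizing b with
  | nil =>
    by_cases hb : 0 < b ∧ m < d
    · exact absurd (h (by simpa using hb.1)) (not_le.mpr hb.2)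
    · simp [pvPopA, if_neg hb]
  | cons t ts ih =>
    by_cases hc : 0 < b ∧ t < d
    · simp only [List.cons_append, pvPopA, if_pos hc]
      exact ih (b - 1) (fun hl => h (by simp only [List.length_cons]; omega))
    · simp [pvPopA, if_neg hc]

-- a stack of elements all below d, within budget, is popped entirely
theorem pvPopA_all (d : Char) (b : Nat) (s : List Char)
    (hlt : ∀ x ∈ s, x < d) (hle : s.length ≤ b) :
    pvPopA d b s = (b - s.length, []) := by
  induction s generalizing b with
  | nil => simp [pvPopA]
  | cons t ts ih =>
    have h : 0 < b ∧ t < d := ⟨by simp at hle; omega, hlt t (List.mem_cons_self)⟩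
    rw [pvPopA, if_pos h, ih (b - 1) (fun x hx => hlt x (List.mem_cons_of_mem _ hx))
        (by simp at hle; omega)]
    simp only [List.length_cons]
    congr 1
    omega

theorem pvRunA_append (ys zs : List Char) (b : Nat) (st : List Char) :
    pvRunA (ys ++ zs) b st = pvRunA zs (pvRunA ys b st).1 (pvRunA ys b st).2 := by
  induction ys generalizing b st with
  | nil => simp [pvRunA]
  | cons d ds ih => simp only [List.cons_append, pvRunA]; exact ih _ _

theorem pvRunA_len (ys : List Char) (b : Nat) (st : List Char) :
    (pvRunA ys b st).1 + st.length + ys.length = b + (pvRunA ys b st).2.length ∧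
    (pvRunA ys b st).1 ≤ b := by
  induction ys generalizing b st with
  | nil => simp [pvRunA]
  | cons d ds ih =>
    have hp := pvPopA_len d b st
    have hr := ih (pvPopA d b st).1 (d :: (pvPopA d b st).2)
    simp only [pvRunA, List.length_cons] at *
    omega

theorem pvRunA_mem (ys : List Char) (b : Nat) (st : List Char) {x : Char}
    (hx : x ∈ (pvRunA ys b st).2) : x ∈ st ∨ x ∈ ys := by
  induction ys generalizing b st with
  | nil => exact Or.inl (by simpa [pvRunA] using hx)
  | cons d ds ih =>
    rcases ih (pvPopA d b st).1 (d :: (pvPopA d b st).2) (by simpa [pvRunA] using hx) with h | h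
    · rcases List.mem_cons.mp h with h | h
      · exact Or.inr (h ▸ List.mem_cons_self)
      · exact Or.inl (pvPopA_mem d b st h)
    · exact Or.inr (List.mem_cons_of_mem _ h)

-- frame for the whole run: the bottom m stays put if every digit the budget could reach it through is ≤ m
theorem pvRunA_frame (ys : List Char) (b : Nat) (s : List Char) (m : Char)
    (h : ∀ j (hj : j < ys.length), s.length + j < b → ys[j] ≤ m) :
    pvRunA ys b (s ++ [m]) = ((pvRunA ys b s).1, (pvRunA ys b s).2 ++ [m]) := by
  induction ys generalizing b s with
  | nil => simp [pvRunA]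
  | cons d ds ih =>
    have h0 : s.length < b → d ≤ m := fun hl => h 0 (by simp) (by omega)
    have hp := pvPopA_len d b s
    simp only [pvRunA, pvPopA_frame d m b s h0]
    rw [← List.cons_append]
    exact ih (pvPopA d b s).1 (d :: (pvPopA d b s).2)
      (fun j hj hlen => h (j + 1) (by simp; omega)
        (by simp only [List.length_cons] at hlen; omega))

-- establishing the bottom: after a prefix of digits all < m, the arriving m empties the stack within budget
theorem pvRunA_estab (ys : List Char) (m : Char) (b : Nat)
    (h : ∀ x ∈ ys, x < m) (hb : ys.length ≤ b) :
    pvRunA (ys ++ [m]) b [] = (b - ys.length, [m]) := by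
  rw [pvRunA_append]
  have hlen := pvRunA_len ys b []
  have hmem : ∀ x ∈ (pvRunA ys b []).2, x < m := by
    intro x hx
    rcases pvRunA_mem ys b [] hx with hx' | hx'
    · simp at hx'
    · exact h x hx'
  have hall := pvPopA_all m (pvRunA ys b []).1 (pvRunA ys b []).2 hmem
    (by simp at hlen; omega)
  simp only [pvRunA, hall]
  simp only [List.length_nil] at hlen
  obtain ⟨h1, h2⟩ := hlen
  simp only [Prod.mk.injEq]
  exact ⟨by omega, trivial⟩

-- the heart: A's (stack, take k) equals B's window-leftmost-max recursion
theorem pvMain (k : Nat) : ∀ xs : List Char, k ≤ xs.length →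
    ((pvRunA xs (xs.length - k) []).2.reverse).take k = pvPickB xs k := by
  induction k with
  | zero => intro xs _; simp [pvPickB]
  | succ k ih =>
    intro xs hk
    have hwlen : (xs.take (xs.length - (k + 1) + 1)).length = xs.length - (k + 1) + 1 := by
      simp; omega
    obtain ⟨m, hm⟩ : ∃ m, PySem.List.max? (xs.take (xs.length - (k + 1) + 1)) (fun y => y) = some m := by
      cases hmm : PySem.List.max? (xs.take (xs.length - (k + 1) + 1)) (fun y => y) with
      | none =>
        rw [(PySem.List.max?_eq_none_iff _ _).mp hmm] at hwlen
        simp at hwlen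
      | some m => exact ⟨m, rfl⟩
    have hmmem := PySem.List.max?_mem hm
    obtain ⟨i, hi⟩ : ∃ i, PySem.List.index? (xs.take (xs.length - (k + 1) + 1)) m = some i := by
      cases hii : PySem.List.index? (xs.take (xs.length - (k + 1) + 1)) m with
      | none => exact absurd hmmem ((PySem.List.index?_eq_none_iff _ _).mp hii)
      | some i => exact ⟨i, rfl⟩
    obtain ⟨hik, hgw, hne⟩ := PySem.List.getElem_of_index?_eq_some hi
    have hile : i ≤ xs.length - (k + 1) := by rw [hwlen] at hik; omega
    have hin : i < xs.length := by omega
    have hgx : xs[i] = m := by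
      rw [← hgw]; exact (List.getElem_take).symm
    -- prefix digits are strictly below m (m is the FIRST maximum of the window)
    have hpre : ∀ x ∈ xs.take i, x < m := by
      intro x hx
      obtain ⟨j, hj, rfl⟩ := List.mem_iff_getElem.mp hx
      have hji : j < i := by simp at hj; omega
      have e1 : (xs.take i)[j] = xs[j] := List.getElem_take
      have hjw : j < (xs.take (xs.length - (k + 1) + 1)).length := by omega
      have e2 : (xs.take (xs.length - (k + 1) + 1))[j] = xs[j] := List.getElem_take
      have hle : (xs.take (xs.length - (k + 1) + 1))[j] ≤ m :=
        PySem.List.max?_isMax hm _ (List.getElem_mem hjw)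
      have hnej := hne j hji
      rw [e1]; rw [e2] at hle hnej
      exact lt_of_le_of_ne hle hnej
    -- the digits m's budget could reach it through are all within the window, hence ≤ m
    have hsuf : ∀ j (hj : j < (xs.drop (i + 1)).length), j < xs.length - (k + 1) - i →
        (xs.drop (i + 1))[j] ≤ m := by
      intro j hj hjr
      have e1 : (xs.drop (i + 1))[j] = xs[i + 1 + j] := List.getElem_drop ..
      have hjw : i + 1 + j < (xs.take (xs.length - (k + 1) + 1)).length := by omega
      have e2 : (xs.take (xs.length - (k + 1) + 1))[i + 1 + j] = xs[i + 1 + j] := List.getElem_take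
      have hle : (xs.take (xs.length - (k + 1) + 1))[i + 1 + j] ≤ m :=
        PySem.List.max?_isMax hm _ (List.getElem_mem hjw)
      rw [e1, ← e2]; exact hle
    have hilen : (xs.take i).length = i := by simp; omega
    have hxs : xs.take i ++ [m] ++ xs.drop (i + 1) = xs := by
      rw [List.append_assoc, List.singleton_append, ← hgx, ← List.drop_eq_getElem_cons hin]
      exact List.take_append_drop i xs
    have e0 : pvRunA (xs.take i ++ [m]) (xs.length - (k + 1)) [] = (xs.length - (k + 1) - i, [m]) := by
      have := pvRunA_estab (xs.take i) m (xs.length - (k + 1)) hpre (by omega)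
      rwa [hilen] at this
    have e2 : pvRunA (xs.take i ++ [m] ++ xs.drop (i + 1)) (xs.length - (k + 1)) [] =
        ((pvRunA (xs.drop (i + 1)) (xs.length - (k + 1) - i) []).1,
         (pvRunA (xs.drop (i + 1)) (xs.length - (k + 1) - i) []).2 ++ [m]) := by
      rw [pvRunA_append, e0]
      have hfr := pvRunA_frame (xs.drop (i + 1)) (xs.length - (k + 1) - i) [] m
        (by intro j hj hb; exact hsuf j hj (by simpa using hb))
      simpa using hfr
    rw [hxs] at e2
    rw [e2]
    simp only [List.reverse_append, List.reverse_cons, List.reverse_nil, List.nil_append,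
      List.singleton_append, List.take_succ_cons]
    -- unfold B's step: its window max is m, its index is i
    rw [pvPickB]
    simp only [hm, hi, Option.getD_some]
    refine congrArg (List.cons m) ?_
    have hrw : xs.length - (k + 1) - i = (xs.drop (i + 1)).length - k := by simp; omega
    rw [hrw]
    exact ih (xs.drop (i + 1)) (by simp; omega)

-- ===== VERDICT (by name: the statement is the Claim_ definition above) =====
theorem part_2_generalized_max_bank_joltage_spec : Claim_equal_part_2_generalized_max_bank_joltage := by
  intro bank k _ hpre
  obtain ⟨h1, h2⟩ := hpre
  unfold Spec_part_2_generalized_max_bank_joltage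
  simp only [part_2_generalized_max_bank_joltage, part_2_generalized_max_bank_joltage_alt]
  have hg : ¬(k ≤ 0 ∨ ((PySem.Int.toChars bank).length : Int) < k) := by omega
  rw [if_neg hg, if_neg hg]
  have hk : k.toNat ≤ (PySem.Int.toChars bank).length := by omega
  rw [pvMain k.toNat (PySem.Int.toChars bank) hk]
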